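-- pv_equiv track=rewrite | github.com/michelbierlaire/biogeme | src/biogeme/sampling_of_alternatives/sampling_of_alternatives.py | generate_segment_size
-- ===== SOURCE A (Python) =====
-- def generate_segment_size(sample_size: int, number_of_segments: int) -> list[int]:
--     """This function calculates the size of each segment, so that
--     they are as close to each other as possible, and cover the full sample
--
--     :param sample_size: total size of the sample
--     :type sample_size: int
--
--     :param number_of_segments: number of segments
--     :type number_of_segments: int
--
--     :return: list of length number_of_segments, containing the segment sizes
--     :rtype: list[int]
--
--     """
--     if sample_size < 0:
--         raise ValueError("Sample size cannot be negative.")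
--     if number_of_segments <= 0:
--         raise ValueError("Number of segments must be positive.")
--
--     # Calculate the base value and the remainder
--     base_value = sample_size // number_of_segments
--     remainder = sample_size % number_of_segments
--
--     # Distribute the base value across the list
--     segment_sizes = [base_value] * number_of_segments
--
--     # Distribute the remainder across the first few elements
--     for i in range(remainder):
--         segment_sizes[i] += 1
--
--     return segment_sizes
-- ===== SOURCE B (Python) =====
-- def generate_segment_size(sample_size: int, number_of_segments: int) -> list[int]:
--     if sample_size < 0:
--         raise ValueError("Sample size cannot be negative.")
--     if number_of_segments <= 0:
--         raise ValueError("Number of segments must be positive.")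
--     # Greedy sequential peel: give the next segment the ceiling of the even
--     # share of what remains, then recurse on the rest.  No divmod of the whole
--     # sample, no remainder bookkeeping, no patching of a prefilled list.
--     segment_sizes = []
--     remaining = sample_size
--     segments_left = number_of_segments
--     while segments_left > 0:
--         first = -(-remaining // segments_left)  # ceil division of the remainder
--         segment_sizes.append(first)
--         remaining -= first
--         segments_left -= 1
--     return segment_sizes
-- ===== Notes on version B (the rewrite author's own statement) =====
-- stated objective: alternative
-- what changed: Replaces A's divmod-once fill-then-patch construction with a greedy sequential peel that, at each step, assigns the next segment the ceiling of the even share of the remaining sample and recurses on the remainder.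
import Mathlib
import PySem

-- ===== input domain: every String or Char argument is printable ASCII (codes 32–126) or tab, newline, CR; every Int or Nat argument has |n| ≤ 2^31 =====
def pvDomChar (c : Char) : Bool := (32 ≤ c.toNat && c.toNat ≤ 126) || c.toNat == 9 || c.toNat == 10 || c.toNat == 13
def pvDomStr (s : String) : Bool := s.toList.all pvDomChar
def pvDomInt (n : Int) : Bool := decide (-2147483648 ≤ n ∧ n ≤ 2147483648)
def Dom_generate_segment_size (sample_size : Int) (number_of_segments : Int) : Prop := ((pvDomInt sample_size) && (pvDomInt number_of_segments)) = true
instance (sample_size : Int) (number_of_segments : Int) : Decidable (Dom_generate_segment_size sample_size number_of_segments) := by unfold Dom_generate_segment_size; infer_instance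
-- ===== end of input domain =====

-- B replaces A's divmod-once fill-then-patch construction with a greedy sequential peel
-- (each segment gets the ceiling of the even share of what remains) — objective: alternative.

-- ===== PORT A =====
def generate_segment_size (sample_size : Int) (number_of_segments : Int) : List Int :=
  let base_value := PySem.Int.floordiv sample_size number_of_segments
  let remainder := PySem.Int.mod sample_size number_of_segments
  let segment_sizes := List.replicate number_of_segments.toNat base_value
  (PySem.List.pyRange 0 remainder 1).foldl (fun l i => l.modify i.toNat (· + 1)) segment_sizes

-- ===== PORT B =====
-- The while loop of Source B; Python's `while segments_left > 0` becomes the guard.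
def pvPeelLoop (remaining : Int) (segments_left : Int) (acc : List Int) : List Int :=
  if h : 0 < segments_left then
    let first := -(PySem.Int.floordiv (-remaining) segments_left)
    pvPeelLoop (remaining - first) (segments_left - 1) (acc ++ [first])
  else acc
termination_by segments_left.toNat
decreasing_by omega

def generate_segment_size_alt (sample_size : Int) (number_of_segments : Int) : List Int :=
  pvPeelLoop sample_size number_of_segments []

-- ===== PRECONDITION & SPEC =====
-- Pre_ excludes exactly the inputs on which A raises ValueError (negative sample size, non-positive number of segments).
def Pre_generate_segment_size (sample_size : Int) (number_of_segments : Int) : Prop :=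
  0 ≤ sample_size ∧ 0 < number_of_segments
instance (sample_size : Int) (number_of_segments : Int) : Decidable (Pre_generate_segment_size sample_size number_of_segments) := by unfold Pre_generate_segment_size; infer_instance
def pvWitness_generate_segment_size : Int × Int := (7, 3)

def Spec_generate_segment_size (sample_size : Int) (number_of_segments : Int) (out : List Int) : Prop := out = generate_segment_size_alt sample_size number_of_segments
instance (sample_size : Int) (number_of_segments : Int) (out : List Int) : Decidable (Spec_generate_segment_size sample_size number_of_segments out) := by unfold Spec_generate_segment_size; infer_instance

-- ===== CLAIM =====
def Claim_equal_generate_segment_size : Prop := ∀ (sample_size : Int) (number_of_segments : Int), Dom_generate_segment_size sample_size number_of_segments → Pre_generate_segment_size sample_size number_of_segments → Spec_generate_segment_size sample_size number_of_segments (generate_segment_size sample_size number_of_segments)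

-- ===== LEMMAS AND PROOFS =====

-- Modifying the element just past a prefix hits the head of the suffix.
theorem modify_append_cons (f : Int → Int) (x : Int) (l2 : List Int) :
    ∀ l1 : List Int, (l1 ++ x :: l2).modify l1.length f = l1 ++ f x :: l2 := by
  intro l1
  induction l1 with
  | nil => simp [List.modify]
  | cons a t ih => simpa [List.modify] using ih

theorem modify_append_cons_len (f : Int → Int) (x : Int) (l2 l1 : List Int) (i : Nat)
    (h : l1.length = i) : (l1 ++ x :: l2).modify i f = l1 ++ f x :: l2 :=
  h ▸ modify_append_cons f x l2 l1

-- A's side: patching the first k entries of a length-n uniform list yields two replicated blocks.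
theorem patch_replicate (b : Int) :
    ∀ (k n : Nat), k ≤ n →
      (List.range k).foldl (fun l j => l.modify j (· + 1)) (List.replicate n b)
        = List.replicate k (b + 1) ++ List.replicate (n - k) b := by
  intro k
  induction k with
  | zero => intro n _; simp
  | succ k ih =>
    intro n hk
    rw [List.range_succ, List.foldl_append, ih n (Nat.le_of_succ_le hk)]
    simp only [List.foldl_cons, List.foldl_nil]
    have hnk : n - k = (n - (k + 1)) + 1 := by omega
    rw [hnk, List.replicate_succ, modify_append_cons_len _ _ _ _ _ (by simp)]
    simp [List.replicate_succ']

-- B's side: the peel loop produces the same two replicated blocks.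
theorem peel_closed :
    ∀ (k : Nat) (n : Int) (acc : List Int), 0 ≤ n →
      pvPeelLoop n ((k : Int) + 1) acc
        = acc ++ (List.replicate (n % ((k : Int) + 1)).toNat (n / ((k : Int) + 1) + 1)
            ++ List.replicate ((k + 1) - (n % ((k : Int) + 1)).toNat) (n / ((k : Int) + 1))) := by
  intro k
  induction k with
  | zero =>
    intro n acc hn
    rw [pvPeelLoop, dif_pos (by omega)]
    rw [pvPeelLoop, dif_neg (by omega)]
    rw [PySem.Int.floordiv_eq_ediv_of_pos (by omega)]
    simp
  | succ k ih =>
    intro n acc hn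
    push_cast
    set m : Int := (k : Int) + 1 + 1 with hm
    have hm0 : (0 : Int) < m := by omega
    set q : Int := n / m with hq
    set r : Int := n % m with hr
    have hqr : m * q + r = n := by rw [hq, hr]; exact Int.ediv_add_emod n m
    have hr0 : 0 ≤ r := Int.emod_nonneg n (by omega)
    have hrm : r < m := Int.emod_lt_of_pos n hm0
    have hq0 : 0 ≤ q := Int.ediv_nonneg hn (by omega)
    clear_value q r
    have hfirst : -(PySem.Int.floordiv (-n) m) = if r = 0 then q else q + 1 := by
      rw [PySem.Int.floordiv_eq_ediv_of_pos hm0]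
      by_cases h0 : r = 0
      · rw [if_pos h0]
        have hneg : (-n) / m = -q ∧ (-n) % m = 0 :=
          (Int.ediv_emod_unique hm0).mpr
            ⟨by linear_combination -hqr + h0, by omega, by omega⟩
        omega
      · rw [if_neg h0]
        have hneg : (-n) / m = -(q + 1) ∧ (-n) % m = m - r :=
          (Int.ediv_emod_unique hm0).mpr
            ⟨by linear_combination -hqr, by omega, by omega⟩
        omega
    rw [pvPeelLoop, dif_pos hm0]
    simp only [hfirst]
    by_cases h0 : r = 0
    · rw [if_pos h0]
      have hstep : m - 1 = (k : Int) + 1 := by omega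
      have hsplit : m * q = q * ((k : Int) + 1) + q := by rw [hm]; ring
      rw [show n - q = q * ((k : Int) + 1) by omega, hstep]
      rw [ih (q * ((k : Int) + 1)) _ (mul_nonneg hq0 (by omega))]
      have hdm : q * ((k : Int) + 1) / ((k : Int) + 1) = q ∧
          q * ((k : Int) + 1) % ((k : Int) + 1) = 0 :=
        (Int.ediv_emod_unique (by omega : (0:Int) < (k : Int) + 1)).mpr
          ⟨by ring, by omega, by omega⟩
      rw [hdm.1, hdm.2, h0]
      simp [List.replicate_succ]
    · rw [if_neg h0]
      have hsplit : m * q = ((k : Int) + 1) * q + q := by rw [hm]; ring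
      have hn' : n - (q + 1) = ((k : Int) + 1) * q + (r - 1) := by omega
      have hstep : m - 1 = (k : Int) + 1 := by omega
      rw [hstep, hn']
      rw [ih _ _ (by have hnn : (0:Int) ≤ ((k:Int)+1) * q := mul_nonneg (by omega) hq0; omega)]
      have hdm : (((k : Int) + 1) * q + (r - 1)) / ((k : Int) + 1) = q ∧
          (((k : Int) + 1) * q + (r - 1)) % ((k : Int) + 1) = r - 1 :=
        (Int.ediv_emod_unique (by omega : (0:Int) < (k : Int) + 1)).mpr
          ⟨by ring, by omega, by omega⟩
      rw [hdm.1, hdm.2]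
      have h1 : r.toNat = (r - 1).toNat + 1 := by omega
      have h2 : (k + 1) - (r - 1).toNat = (k + 1 + 1) - r.toNat := by omega
      rw [h1, h2, List.replicate_succ]
      simp
      omega

-- ===== VERDICT =====
theorem generate_segment_size_spec : Claim_equal_generate_segment_size := by
  intro s n _ hpre
  obtain ⟨hs, hn⟩ := hpre
  have hr0 : 0 ≤ PySem.Int.mod s n := PySem.Int.mod_nonneg s hn
  have hrn : PySem.Int.mod s n < n := PySem.Int.mod_lt s hn
  unfold Spec_generate_segment_size
  -- A's side to closed form
  simp only [generate_segment_size, generate_segment_size_alt,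
    PySem.List.pyRange_one, List.foldl_map, sub_zero, zero_add, Int.toNat_natCast]
  rw [patch_replicate _ _ _ (by omega)]
  -- B's side to closed form
  obtain ⟨k, hk⟩ : ∃ k : Nat, (k : Int) + 1 = n := ⟨n.toNat - 1, by omega⟩
  rw [← hk, peel_closed k s [] hs, List.nil_append, hk]
  rw [PySem.Int.floordiv_eq_ediv_of_pos hn, PySem.Int.mod_eq_emod_of_pos hn]
  congr 1
  congr 1
  have := Int.emod_nonneg s (by omega : n ≠ 0)
  omega
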